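-- pv_equiv track=rewrite | github.com/kobeomseok95/codingTest | programmers/level2/60058_4.py | proper
-- ===== SOURCE A (Python) =====
-- def proper(string):
--     left, right = 0, 0
--     for i in range(len(string)):
--         if string[i] == '(':
--             left += 1
--         else:
--             right += 1
--
--         if left < right:
--             return False
--
--     return True
-- ===== SOURCE B (Python) =====
-- def proper(string):
--     # Divide and conquer: each segment is summarised by (total delta, minimum
--     # prefix balance); summaries of halves combine associatively.
--     def scan(s):
--         n = len(s)
--         if n == 0:
--             return (0, 0)
--         if n == 1:
--             d = 1 if s == '(' else -1
--             return (d, min(d, 0))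
--         m = n // 2
--         t1, m1 = scan(s[:m])
--         t2, m2 = scan(s[m:])
--         return (t1 + t2, min(m1, t1 + m2))
--     return scan(string)[1] >= 0
-- ===== Notes on version B (the rewrite author's own statement) =====
-- stated objective: alternative
-- what changed: Replaces A's linear left-to-right scan with two counters and early return by a divide-and-conquer recursion that summarises each half of the string as (total delta, minimum prefix balance) and combines the summaries with the segment-tree merge rule.
import Mathlib
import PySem

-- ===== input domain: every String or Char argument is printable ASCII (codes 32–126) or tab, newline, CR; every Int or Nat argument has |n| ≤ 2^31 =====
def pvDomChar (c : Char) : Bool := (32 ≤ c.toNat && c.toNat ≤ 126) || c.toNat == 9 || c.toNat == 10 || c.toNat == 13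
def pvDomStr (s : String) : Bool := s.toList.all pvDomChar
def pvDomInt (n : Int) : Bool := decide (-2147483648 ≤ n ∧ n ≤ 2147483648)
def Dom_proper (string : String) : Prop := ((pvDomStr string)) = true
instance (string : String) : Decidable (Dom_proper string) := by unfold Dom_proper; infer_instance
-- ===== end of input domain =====

-- B replaces A's linear two-counter early-return scan by a divide-and-conquer
-- (sum, min-prefix-balance) segment-summary recursion (alternative, not faster).

-- ===== PORT A =====
-- the for-loop over string[i] with state (left, right) and early `return False`
def properGo : List Char → Int → Int → Bool
  | [], _, _ => true
  | c :: rest, left, right =>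
    let left' := if c = '(' then left + 1 else left
    let right' := if c = '(' then right else right + 1
    if left' < right' then false else properGo rest left' right'

def proper (string : String) : Bool := properGo string.toList 0 0

-- ===== PORT B =====
-- Source B's `scan`: summary (total delta, minimum prefix balance) of a segment,
-- computed by splitting at n // 2 (s[:m] / s[m:] with 0 ≤ m ≤ n are exactly take/drop)
def pvScanDC : List Char → Int × Int
  | [] => (0, 0)
  | [c] => let d : Int := if c = '(' then 1 else -1; (d, min d 0)
  | l@(_ :: _ :: _) =>
      let m := l.length / 2
      let r1 := pvScanDC (l.take m)
      let r2 := pvScanDC (l.drop m)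
      (r1.1 + r2.1, min r1.2 (r1.1 + r2.2))
termination_by l => l.length
decreasing_by
  all_goals (subst_vars; simp [namedPattern, List.length_take, List.length_drop]; omega)

def proper_alt (string : String) : Bool := decide ((pvScanDC string.toList).2 ≥ 0)

-- ===== PRECONDITION & SPEC =====
def Spec_proper (string : String) (out : Bool) : Prop := out = proper_alt string
instance (string : String) (out : Bool) : Decidable (Spec_proper string out) := by unfold Spec_proper; infer_instance

-- ===== CLAIM (what is proved, stated in full; the proofs are below) =====
def Claim_equal_proper : Prop := ∀ (string : String), Dom_proper string → Spec_proper string (proper string)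

-- ===== LEMMAS AND PROOFS =====

def pvDelta (c : Char) : Int := if c = '(' then 1 else -1

-- total delta of a segment
def sumD : List Char → Int
  | [] => 0
  | c :: r => pvDelta c + sumD r

-- minimum over all prefixes (including the empty one) of the running balance
def minPre : List Char → Int
  | [] => 0
  | c :: r => min 0 (pvDelta c + minPre r)

-- intermediate spec for A: all running balances from b stay nonnegative
def allPrefix : List Char → Int → Bool
  | [], _ => true
  | c :: r, b => (decide (b + pvDelta c ≥ 0)) && allPrefix r (b + pvDelta c)

theorem minPre_nonpos (l : List Char) : minPre l ≤ 0 := by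
  cases l <;> simp [minPre]

theorem sumD_append (a b : List Char) : sumD (a ++ b) = sumD a + sumD b := by
  induction a with
  | nil => simp [sumD]
  | cons c r ih => simp [sumD, ih]; ring

theorem minPre_append (a b : List Char) :
    minPre (a ++ b) = min (minPre a) (sumD a + minPre b) := by
  induction a with
  | nil => simp [minPre, sumD, minPre_nonpos]
  | cons c r ih =>
    simp only [List.cons_append, minPre, sumD, ih]
    omega

theorem scanDC_eq_aux (n : Nat) : ∀ (l : List Char), l.length ≤ n →
    pvScanDC l = (sumD l, minPre l) := by
  induction n with
  | zero =>
    intro l hl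
    have : l = [] := by cases l <;> simp_all
    subst this
    simp [pvScanDC, sumD, minPre]
  | succ k ih =>
    intro l hl
    match l with
    | [] => simp [pvScanDC, sumD, minPre]
    | [c] => simp [pvScanDC, sumD, minPre, pvDelta]; omega
    | a :: b :: r =>
      rw [pvScanDC]
      have hlen : (a :: b :: r).length = r.length + 2 := by simp
      have h1 : (List.take ((a :: b :: r).length / 2) (a :: b :: r)).length ≤ k := by
        simp only [List.length_take]; omega
      have h2 : (List.drop ((a :: b :: r).length / 2) (a :: b :: r)).length ≤ k := by
        simp only [List.length_drop]; omega
      simp only [ih _ h1, ih _ h2]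
      have h := List.take_append_drop ((a :: b :: r).length / 2) (a :: b :: r)
      conv_rhs => rw [← h]
      rw [sumD_append, minPre_append]

theorem scanDC_eq (l : List Char) : pvScanDC l = (sumD l, minPre l) :=
  scanDC_eq_aux l.length l le_rfl

theorem properGo_eq_allPrefix (l : List Char) : ∀ (left right : Int),
    properGo l left right = allPrefix l (left - right) := by
  induction l with
  | nil => intro left right; simp [properGo, allPrefix]
  | cons c rest ih =>
    intro left right
    by_cases hc : c = '('
    · by_cases hlr : left + 1 < right
      · simp [properGo, allPrefix, hc, hlr, pvDelta]; omega
      · have h1 : properGo (c :: rest) left right = properGo rest (left + 1) right := by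
          simp [properGo, hc, hlr]
        rw [h1, ih]
        simp [allPrefix, pvDelta, hc]
        have hb : decide ((0:Int) ≤ left - right + 1) = true := by simp; omega
        rw [hb, Bool.true_and]
        congr 1; ring
    · by_cases hlr : left < right + 1
      · simp [properGo, allPrefix, hc, hlr, pvDelta]; omega
      · have h1 : properGo (c :: rest) left right = properGo rest left (right + 1) := by
          simp [properGo, hc, hlr]
        rw [h1, ih]
        simp [allPrefix, pvDelta, hc]
        have hb : decide ((1:Int) ≤ left - right) = true := by simp; omega
        rw [hb, Bool.true_and]
        congr 1; ring

theorem allPrefix_eq_minPre (l : List Char) : ∀ (b : Int), 0 ≤ b →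
    allPrefix l b = decide (0 ≤ b + minPre l) := by
  induction l with
  | nil => intro b hb; simp [allPrefix, minPre]; omega
  | cons c r ih =>
    intro b hb
    simp only [allPrefix, minPre]
    by_cases h : 0 ≤ b + pvDelta c
    · rw [ih (b + pvDelta c) h]
      have : (decide (b + pvDelta c ≥ 0)) = true := by simp; omega
      rw [this, Bool.true_and]
      congr 1
      simp only [eq_iff_iff]
      omega
    · have h1 : (decide (b + pvDelta c ≥ 0)) = false := by simp; omega
      have h2 := minPre_nonpos r
      have h3 : ¬ (0 ≤ b + min 0 (pvDelta c + minPre r)) := by omega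
      simp [h1, h3]

-- ===== VERDICT (by name: the statement is the Claim_ definition above) =====
theorem proper_spec : Claim_equal_proper := by
  intro s _
  unfold Spec_proper proper proper_alt
  rw [properGo_eq_allPrefix, scanDC_eq]
  have h0 : (0:Int) - 0 = 0 := by ring
  rw [h0, allPrefix_eq_minPre _ 0 le_rfl]
  simp only [zero_add, ge_iff_le]
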